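-- pv_equiv track=rewrite | github.com/Ideadly-Skies/Sty_Stack | Exercises/reverse_some_chars.py | reverse_some_chars
-- ===== SOURCE A (Python) =====
-- def reverse_some_chars(s, chars):
--     chars_dict = { c:0 for c in chars }
--     stack = []
--
--     for char in s:
--         # O(1) (reduced from O(n))
--         if char in chars_dict:
--             stack.append(char)
--
--     # construct output str
--     output = ""
--     for char in s:
--         if char in chars_dict:
--             output += stack.pop()
--         else:
--             output += char
--
--     return output
-- ===== SOURCE B (Python) =====
-- def reverse_some_chars(s, chars):
--     selected = set(chars)
--     arr = list(s)
--     i, j = 0, len(arr) - 1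
--     while i < j:
--         if arr[i] not in selected:
--             i += 1
--         elif arr[j] not in selected:
--             j -= 1
--         else:
--             arr[i], arr[j] = arr[j], arr[i]
--             i += 1
--             j -= 1
--     return ''.join(arr)
-- ===== Notes on version B (the rewrite author's own statement) =====
-- stated objective: alternative
-- what changed: Replaces A's stack plus two forward passes with string concatenation by an in-place two-pointer bidirectional pass over a char list that swaps selected characters from both ends.
import Mathlib
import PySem

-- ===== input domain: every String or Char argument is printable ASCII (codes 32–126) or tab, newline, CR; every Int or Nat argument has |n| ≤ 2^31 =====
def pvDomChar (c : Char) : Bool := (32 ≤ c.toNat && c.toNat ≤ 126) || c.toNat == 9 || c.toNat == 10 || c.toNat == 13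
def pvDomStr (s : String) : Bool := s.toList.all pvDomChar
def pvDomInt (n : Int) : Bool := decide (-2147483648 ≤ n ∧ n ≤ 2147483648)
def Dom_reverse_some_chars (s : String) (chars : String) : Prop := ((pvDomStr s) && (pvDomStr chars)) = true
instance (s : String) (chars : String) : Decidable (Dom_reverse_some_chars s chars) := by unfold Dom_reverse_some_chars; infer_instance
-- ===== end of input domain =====

-- B swaps selected characters in place with two pointers moving from both ends of a char list,
-- instead of A's stack plus two forward passes with string concatenation.

-- ===== PORT A =====
-- literal port of A: dict comprehension, stack-filling pass, then a second pass popping the stack.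
-- '.getLastD ' '' ports stack.pop(); its default is unreachable (the stack holds exactly the selected chars).
def reverse_some_chars (s : String) (chars : String) : String :=
  let chars_dict : PySem.Dict Char Int :=
    chars.toList.foldl (fun d c => d.insert c 0) PySem.Dict.empty
  let stack : List Char :=
    s.toList.foldl (fun st c => if chars_dict.contains c then st ++ [c] else st) []
  let r := s.toList.foldl
    (fun (acc : List Char × List Char) c =>
      if chars_dict.contains c then (acc.1 ++ [acc.2.getLastD ' '], acc.2.dropLast)
      else (acc.1 ++ [c], acc.2)) ([], stack)
  String.mk r.1

-- ===== PORT B =====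
-- literal port of B's while loop: two Nat indices into the char list; 'arr[i]' reads port as
-- '.getD _ ' '' (in range whenever the loop reads, so exact) and the simultaneous swap as two
-- '.set' with both values read first.  'j = len(arr) - 1' is Nat subtraction: for the empty
-- string Python has j = -1 and B's loop body never runs, exactly as with j = 0 here.
def pvTwoPtr (p : Char → Bool) (l : List Char) (i j : Nat) : List Char :=
  if i < j then
    if ¬ p (l.getD i ' ') then pvTwoPtr p l (i + 1) j
    else if ¬ p (l.getD j ' ') then pvTwoPtr p l i (j - 1)
    else pvTwoPtr p ((l.set i (l.getD j ' ')).set j (l.getD i ' ')) (i + 1) (j - 1)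
  else l
termination_by j - i
decreasing_by all_goals omega

def reverse_some_chars_alt (s : String) (chars : String) : String :=
  let selected : PySem.Set Char := PySem.Set.ofList chars.toList
  let arr := s.toList
  String.mk (pvTwoPtr (fun c => PySem.Set.contains selected c) arr 0 (arr.length - 1))

-- ===== PRECONDITION & SPEC =====
def Spec_reverse_some_chars (s : String) (chars : String) (out : String) : Prop := out = reverse_some_chars_alt s chars
instance (s : String) (chars : String) (out : String) : Decidable (Spec_reverse_some_chars s chars out) := by unfold Spec_reverse_some_chars; infer_instance

-- ===== CLAIM (what is proved, stated in full; the proofs are below) =====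
def Claim_equal_reverse_some_chars : Prop := ∀ (s : String) (chars : String), Dom_reverse_some_chars s chars → Spec_reverse_some_chars s chars (reverse_some_chars s chars)

-- ===== LEMMAS AND PROOFS =====

-- queue-consuming merge: selected positions take chars from the front of q
def fQ (p : Char → Bool) : List Char → List Char → List Char
  | [], _ => []
  | c :: t, q => if p c then q.head?.getD ' ' :: fQ p t q.tail else c :: fQ p t q

-- stack-consuming merge: selected positions take chars from the back of st
def gS (p : Char → Bool) : List Char → List Char → List Char
  | [], _ => []
  | c :: t, st => if p c then st.getLast?.getD ' ' :: gS p t st.dropLast else c :: gS p t st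

-- the common target: s with its selected subsequence reversed
def tgt (p : Char → Bool) (l : List Char) : List Char := fQ p l ((l.filter p).reverse)

theorem pv_dict_contains (chars : String) (c : Char) :
    (chars.toList.foldl (fun d c => d.insert c 0) (PySem.Dict.empty : PySem.Dict Char Int)).contains c
      = chars.toList.contains c := by
  rw [PySem.Dict.contains_eq_decide_mem_keys, PySem.Dict.keys_foldl_insert]
  simp [PySem.Set.mem_update, PySem.Dict.keys_empty]

theorem pv_set_contains (chars : String) (c : Char) :
    PySem.Set.contains (PySem.Set.ofList chars.toList) c = chars.toList.contains c := by
  simp [PySem.Set.mem_ofList]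

theorem foldl_filter_pv (p : Char → Bool) : ∀ (l acc : List Char),
    l.foldl (fun st c => if p c then st ++ [c] else st) acc = acc ++ l.filter p := by
  intro l
  induction l with
  | nil => simp
  | cons c t ih =>
    intro acc
    by_cases h : p c <;> simp [List.foldl_cons, h, ih]

theorem foldlA_fst (p : Char → Bool) : ∀ (l : List Char) (out st : List Char),
    (l.foldl (fun (acc : List Char × List Char) c =>
      if p c then (acc.1 ++ [acc.2.getLast?.getD ' '], acc.2.dropLast)
      else (acc.1 ++ [c], acc.2)) (out, st)).1 = out ++ gS p l st := by
  intro l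
  induction l with
  | nil => simp [gS]
  | cons c t ih =>
    intro out st
    by_cases h : p c <;> simp [List.foldl_cons, h, gS, ih]

theorem gS_eq_fQ (p : Char → Bool) : ∀ (l st : List Char),
    gS p l st = fQ p l st.reverse := by
  intro l
  induction l with
  | nil => intro st; rfl
  | cons c t ih =>
    intro st
    by_cases h : p c <;> simp [gS, fQ, h, ih, List.tail_reverse]

-- fQ only looks at the first (countP) elements of the queue
theorem fQ_take (p : Char → Bool) : ∀ (u r r' : List Char),
    r.take (u.countP p) = r'.take (u.countP p) → fQ p u r = fQ p u r' := by
  intro u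
  induction u with
  | nil => intro r r' _; rfl
  | cons c t ih =>
    intro r r' hrr
    by_cases h : p c
    · rw [List.countP_cons_of_pos h] at hrr
      cases r with
      | nil =>
        cases r' with
        | nil => simp [fQ, h]
        | cons a' x' => simp at hrr
      | cons a x =>
        cases r' with
        | nil => simp at hrr
        | cons a' x' =>
          simp [List.take_succ_cons] at hrr
          obtain ⟨ha, ht⟩ := hrr
          simp [fQ, h, ha, ih x x' ht]
    · rw [List.countP_cons_of_neg h] at hrr
      simp [fQ, h, ih r r' hrr]

theorem fQ_snoc_pos (p : Char → Bool) (c : Char) (hc : p c = true) :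
    ∀ (u r : List Char), u.countP p < r.length →
      fQ p (u ++ [c]) r = fQ p u r ++ [r.getD (u.countP p) ' '] := by
  intro u
  induction u with
  | nil =>
    intro r hr
    cases r with
    | nil => simp at hr
    | cons a x => simp [fQ, hc]
  | cons d u' ih =>
    intro r hr
    by_cases hd : p d
    · rw [List.countP_cons_of_pos hd] at hr
      cases r with
      | nil => simp at hr
      | cons a x =>
        have hx : u'.countP p < x.length := by simpa using hr
        simp [fQ, hd, ih x hx, List.countP_cons_of_pos hd]
    · rw [List.countP_cons_of_neg hd] at hr
      simp [fQ, hd, ih r hr, List.countP_cons_of_neg hd]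

theorem fQ_snoc_neg (p : Char → Bool) (c : Char) (hc : p c = false) :
    ∀ (u r : List Char), fQ p (u ++ [c]) r = fQ p u r ++ [c] := by
  intro u
  induction u with
  | nil => intro r; simp [fQ, hc]
  | cons d u' ih =>
    intro r
    by_cases hd : p d <;> simp [fQ, hd, ih]

-- A's result, rewritten: it is exactly the target
theorem portA_eq_tgt (s chars : String) :
    reverse_some_chars s chars = String.mk (tgt (fun c => chars.toList.contains c) s.toList) := by
  unfold reverse_some_chars tgt
  simp only [pv_dict_contains, List.getLastD_eq_getLast?,
    foldl_filter_pv, foldlA_fst, List.nil_append]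
  rw [gS_eq_fQ]

-- peeling lemmas for tgt
theorem tgt_nil (p : Char → Bool) : tgt p [] = [] := rfl

theorem tgt_single (p : Char → Bool) (c : Char) : tgt p [c] = [c] := by
  by_cases h : p c <;> simp [tgt, fQ, h]

theorem tgt_cons_neg (p : Char → Bool) (c : Char) (hc : p c = false) (l : List Char) :
    tgt p (c :: l) = c :: tgt p l := by
  simp [tgt, fQ, hc]

theorem tgt_snoc_neg (p : Char → Bool) (c : Char) (hc : p c = false) (l : List Char) :
    tgt p (l ++ [c]) = tgt p l ++ [c] := by
  unfold tgt
  rw [List.filter_append]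
  simp only [List.filter_cons, hc, List.filter_nil]
  simpa using fQ_snoc_neg p c hc l ((l.filter p).reverse)

theorem tgt_both (p : Char → Bool) (a b : Char) (ha : p a = true) (hb : p b = true)
    (l : List Char) : tgt p (a :: l ++ [b]) = b :: tgt p l ++ [a] := by
  unfold tgt
  have hfil : ((a :: l ++ [b]).filter p).reverse = b :: (l.filter p).reverse ++ [a] := by
    simp [List.filter_cons, List.filter_append, ha, hb]
  rw [hfil]
  show fQ p (a :: (l ++ [b])) (b :: (l.filter p).reverse ++ [a]) = _
  rw [fQ]
  simp only [ha, if_pos, List.cons_append, List.head?_cons, Option.getD_some, List.tail_cons]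
  have hcnt : l.countP p = ((l.filter p).reverse).length := by
    simp [List.countP_eq_length_filter]
  have hlt : l.countP p < ((l.filter p).reverse ++ [a]).length := by
    simp [hcnt]
  have hsnoc := fQ_snoc_pos p b hb l ((l.filter p).reverse ++ [a]) hlt
  have hget : ((l.filter p).reverse ++ [a]).getD (l.countP p) ' ' = a := by
    rw [hcnt]; simp [List.getD, List.getElem?_concat_length]
  have htake : fQ p l ((l.filter p).reverse ++ [a]) = fQ p l ((l.filter p).reverse) := by
    apply fQ_take
    rw [hcnt, List.take_left, List.take_length]
  rw [hsnoc, htake, hget]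

-- positional list facts
theorem getD_middle : ∀ (pre : List Char) (c : Char) (suf : List Char),
    (pre ++ c :: suf).getD pre.length ' ' = c := by
  intro pre
  induction pre with
  | nil => intro c suf; rfl
  | cons d t ih => intro c suf; simpa using ih c suf

theorem set_middle : ∀ (pre : List Char) (c y : Char) (suf : List Char),
    (pre ++ c :: suf).set pre.length y = pre ++ y :: suf := by
  intro pre
  induction pre with
  | nil => intro c y suf; rfl
  | cons d t ih => intro c y suf; simp [List.set, ih]

-- the two-pointer loop computes the target on the segment [i, j]
theorem twoPtr_eq_tgt (p : Char → Bool) : ∀ (n : Nat) (mid pre suf : List Char) (i j : Nat),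
    mid.length = n → i = pre.length → j + 1 = i + n →
    pvTwoPtr p (pre ++ mid ++ suf) i j = pre ++ tgt p mid ++ suf := by
  intro n
  induction n using Nat.strong_induction_on with
  | _ n ih =>
    intro mid pre suf i j hlen hi hj
    match n, mid, hlen with
    | 0, [], _ =>
      rw [pvTwoPtr]
      have : ¬ i < j := by omega
      simp [this, tgt_nil]
    | 1, [c], _ =>
      rw [pvTwoPtr]
      have : ¬ i < j := by omega
      simp [this, tgt_single]
    | (m + 2), a :: rest0, hlen =>
      -- mid has length ≥ 2: write it as a :: rest ++ [b]
      obtain ⟨rest, b, hr⟩ : ∃ rest b, rest0 = rest ++ [b] := by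
        rcases List.eq_nil_or_concat rest0 with h | ⟨rest, b, h⟩
        · simp [h] at hlen
        · exact ⟨rest, b, by simpa using h⟩
      subst hr
      have hrlen : rest.length = m := by simpa using hlen
      have hij : i < j := by omega
      have hget_i : (pre ++ (a :: (rest ++ [b])) ++ suf).getD i ' ' = a := by
        rw [hi]
        simpa using getD_middle pre a (rest ++ [b] ++ suf)
      have hdecomp : pre ++ (a :: (rest ++ [b])) ++ suf
          = (pre ++ a :: rest) ++ b :: suf := by simp
      have hjlen : j = (pre ++ a :: rest).length := by
        simp [hi] at *; omega
      have hget_j : (pre ++ (a :: (rest ++ [b])) ++ suf).getD j ' ' = b := by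
        rw [hdecomp, hjlen]
        exact getD_middle (pre ++ a :: rest) b suf
      rw [pvTwoPtr]
      simp only [hij, if_pos, hget_i, hget_j]
      by_cases hpa : p a
      · by_cases hpb : p b
        · -- both selected: swap and recurse on the middle
          simp only [hpa, hpb, not_true, if_neg, ite_false, Bool.not_true]
          have hset1 : (pre ++ (a :: (rest ++ [b])) ++ suf).set i b
              = pre ++ (b :: (rest ++ [b])) ++ suf := by
            rw [hi]
            have := set_middle pre a b (rest ++ [b] ++ suf)
            simpa using this
          have hset2 : (pre ++ (b :: (rest ++ [b])) ++ suf).set j a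
              = pre ++ (b :: (rest ++ [a])) ++ suf := by
            have hd2 : pre ++ (b :: (rest ++ [b])) ++ suf = (pre ++ b :: rest) ++ b :: suf := by
              simp
            have hjlen2 : j = (pre ++ b :: rest).length := by
              simp at hjlen ⊢; omega
            rw [hd2, hjlen2, set_middle]
            simp
          rw [hset1, hset2]
          have hrec := ih m (by omega) rest (pre ++ [b]) (a :: suf) (i + 1) (j - 1)
            hrlen (by simp [hi]) (by omega)
          have harr : pre ++ (b :: (rest ++ [a])) ++ suf
              = (pre ++ [b]) ++ rest ++ (a :: suf) := by simp
          rw [harr, hrec,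
            show tgt p (a :: (rest ++ [b])) = b :: tgt p rest ++ [a] from
              tgt_both p a b hpa hpb rest]
          simp
        · -- right end not selected: j decreases
          simp only [hpa, hpb, not_true, not_false_iff, ite_false, ite_true, Bool.not_true,
            Bool.not_false]
          have hrec := ih (m + 1) (by omega) (a :: rest) pre (b :: suf) i (j - 1)
            (by simpa using hrlen) hi (by omega)
          have harr : pre ++ (a :: (rest ++ [b])) ++ suf
              = pre ++ (a :: rest) ++ (b :: suf) := by simp
          rw [harr, hrec,
            show tgt p (a :: (rest ++ [b])) = tgt p (a :: rest) ++ [b] from by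
              simpa using tgt_snoc_neg p b (by simpa using hpb) (a :: rest)]
          simp
      · -- left end not selected: i increases
        simp only [hpa, not_false_iff, ite_true, Bool.not_false]
        have hrec := ih (m + 1) (by omega) (rest ++ [b]) (pre ++ [a]) suf (i + 1) j
          (by simpa using hrlen) (by simp [hi]) (by omega)
        have harr : pre ++ (a :: (rest ++ [b])) ++ suf
            = (pre ++ [a]) ++ (rest ++ [b]) ++ suf := by simp
        rw [harr, hrec, tgt_cons_neg p a (by simpa using hpa)]
        simp

theorem portB_eq_tgt (s chars : String) :
    reverse_some_chars_alt s chars = String.mk (tgt (fun c => chars.toList.contains c) s.toList) := by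
  unfold reverse_some_chars_alt
  simp only [pv_set_contains]
  cases h : s.toList with
  | nil => rw [pvTwoPtr]; simp [tgt_nil]
  | cons c t =>
    have h2 := twoPtr_eq_tgt (fun c => chars.toList.contains c) (c :: t).length (c :: t) [] [] 0
      ((c :: t).length - 1) rfl rfl (by simp)
    simp only [List.nil_append, List.append_nil] at h2
    rw [h2]

-- ===== VERDICT (by name: the statement is the Claim_ definition above) =====
theorem reverse_some_chars_spec : Claim_equal_reverse_some_chars := by
  intro s chars _
  unfold Spec_reverse_some_chars
  rw [portA_eq_tgt, portB_eq_tgt]
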